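-- pv_equiv track=rewrite | github.com/IlayosHere/Trenda | data-retriever/gated_portfolio_optimizer.py | _mls
-- ===== SOURCE A (Python) =====
-- def _mls(exits: list[str]) -> int:
--     streak = mx = 0
--     for e in exits:
--         if e == "SL":
--             streak += 1
--             mx = max(mx, streak)
--         elif e == "TP":
--             streak = 0
--     return mx
-- ===== SOURCE B (Python) =====
-- def _mls(exits: list[str]) -> int:
--     # Partition on "TP" boundaries, then take the max SL count per segment.
--     segments = [[]]
--     for e in exits:
--         if e == "TP":
--             segments.append([])
--         else:
--             segments[-1].append(e)
--     return max(seg.count("SL") for seg in segments)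
-- ===== Notes on version B (the rewrite author's own statement) =====
-- stated objective: alternative
-- what changed: Replaces the inline running streak/max loop with a two-phase partition-then-aggregate: split the list into TP-delimited segments, then return the maximum SL count over segments.
import Mathlib
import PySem

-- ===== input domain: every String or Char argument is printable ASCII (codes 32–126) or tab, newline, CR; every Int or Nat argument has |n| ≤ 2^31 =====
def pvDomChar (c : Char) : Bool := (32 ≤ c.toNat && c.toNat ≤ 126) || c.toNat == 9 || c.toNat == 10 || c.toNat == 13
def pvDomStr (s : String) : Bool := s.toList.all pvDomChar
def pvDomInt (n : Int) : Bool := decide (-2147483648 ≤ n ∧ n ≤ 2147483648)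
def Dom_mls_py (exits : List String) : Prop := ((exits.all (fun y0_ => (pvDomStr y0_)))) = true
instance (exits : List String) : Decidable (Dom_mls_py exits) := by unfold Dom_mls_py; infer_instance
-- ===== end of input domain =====

-- ===== PORT A =====
def mls_py (exits : List String) : Int :=
  (exits.foldl (fun (st : Int × Int) e =>
    if e = "SL" then (st.1 + 1, max st.2 (st.1 + 1))
    else if e = "TP" then (0, st.2)
    else st) (0, 0)).2

-- ===== PORT B =====
def mls_py_alt (exits : List String) : Int :=
  let st := exits.foldl (fun (st : List (List String) × List String) e =>
    if e = "TP" then (st.1 ++ [st.2], ([] : List String))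
    else (st.1, st.2 ++ [e])) ([], [])
  match (st.1 ++ [st.2]).map (fun s => (PySem.List.count s "SL" : Int)) with
  | c :: rest => rest.foldl max c
  | [] => 0

-- ===== PRECONDITION & SPEC =====
def Spec_mls_py (exits : List String) (out : Int) : Prop := out = mls_py_alt exits
instance (exits : List String) (out : Int) : Decidable (Spec_mls_py exits out) := by unfold Spec_mls_py; infer_instance

-- ===== CLAIM (what is proved, stated in full; the proofs are below) =====
def Claim_equal_mls_py : Prop := ∀ (exits : List String), Dom_mls_py exits → Spec_mls_py exits (mls_py exits)

-- ===== LEMMAS AND PROOFS =====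

def pvStepA (st : Int × Int) (e : String) : Int × Int :=
  if e = "SL" then (st.1 + 1, max st.2 (st.1 + 1))
  else if e = "TP" then (0, st.2)
  else st

def pvStepB (st : List (List String) × List String) (e : String) :
    List (List String) × List String :=
  if e = "TP" then (st.1 ++ [st.2], ([] : List String))
  else (st.1, st.2 ++ [e])

def pvCounts (done : List (List String)) (cur : List String) : List Int :=
  (done ++ [cur]).map (fun s => (PySem.List.count s "SL" : Int))

theorem pv_foldl_max_append (l : List Int) (a x : Int) :
    List.foldl max a (l ++ [x]) = max (List.foldl max a l) x := by
  simp [List.foldl_append]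

theorem pv_count_nonneg (s : List String) : (0 : Int) ≤ (PySem.List.count s "SL" : Int) := by
  exact_mod_cast Nat.zero_le _

theorem pv_foldl_max_nonneg (l : List Int) (a : Int) : a ≤ List.foldl max a l := by
  induction l generalizing a with
  | nil => simp
  | cons x xs ih => exact le_trans (le_max_left a x) (ih _)

theorem pv_count_append_ne (s : List String) (e : String) (h : ¬ e = "SL") :
    PySem.List.count (s ++ [e]) "SL" = PySem.List.count s "SL" := by
  simp [PySem.List.count, List.count_append, h]

theorem pv_count_append_SL (s : List String) :
    PySem.List.count (s ++ ["SL"]) "SL" = PySem.List.count s "SL" + 1 := by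
  simp [PySem.List.count, List.count_append]

theorem pv_counts_append : ∀ (done : List (List String)) (cur s : List String),
    pvCounts (done ++ [cur]) s = pvCounts done cur ++ [(PySem.List.count s "SL" : Int)] := by
  intro done cur s; simp [pvCounts]

-- the loop invariant: A carries (streak, mx); B carries (done, cur) with
-- streak = SL-count of cur and mx = max over 0 and the SL-counts of done ++ [cur]
theorem pv_invariant (exits : List String) (done : List (List String)) (cur : List String)
    (streak mx : Int)
    (hstreak : streak = (PySem.List.count cur "SL" : Int))
    (hmx : mx = List.foldl max 0 (pvCounts done cur)) :
    (exits.foldl pvStepA (streak, mx)).2 =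
      List.foldl max 0
        (pvCounts (exits.foldl pvStepB (done, cur)).1 (exits.foldl pvStepB (done, cur)).2) := by
  induction exits generalizing done cur streak mx with
  | nil => simpa using hmx
  | cons e rest ih =>
    by_cases hSL : e = "SL"
    · subst hSL
      simp only [List.foldl_cons, pvStepA, pvStepB,
        if_neg (by decide : ¬ ("SL" : String) = "TP")]
      apply ih done (cur ++ ["SL"]) (streak + 1) (max mx (streak + 1))
      · rw [hstreak, pv_count_append_SL]; push_cast; ring
      · have h2 : pvCounts done (cur ++ ["SL"]) =
            done.map (fun s => (PySem.List.count s "SL" : Int)) ++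
              [(PySem.List.count cur "SL" : Int) + 1] := by
          simp [pvCounts]
        have h3 : pvCounts done cur =
            done.map (fun s => (PySem.List.count s "SL" : Int)) ++
              [(PySem.List.count cur "SL" : Int)] := by simp [pvCounts]
        rw [h2, pv_foldl_max_append, hmx, h3, pv_foldl_max_append, hstreak]
        omega
    · by_cases hTP : e = "TP"
      · subst hTP
        simp only [List.foldl_cons, pvStepA, pvStepB, if_neg hSL]
        apply ih (done ++ [cur]) [] 0 mx
        · simp [PySem.List.count]
        · rw [hmx, pv_counts_append, pv_foldl_max_append]
          have h0 : (PySem.List.count ([] : List String) "SL" : Int) = 0 := by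
            simp [PySem.List.count]
          rw [h0]
          have := pv_foldl_max_nonneg (pvCounts done cur) 0
          omega
      · simp only [List.foldl_cons, pvStepA, pvStepB, if_neg hSL, if_neg hTP]
        apply ih done (cur ++ [e]) streak mx
        · rw [hstreak, pv_count_append_ne cur e hSL]
        · rw [hmx]
          have h1 : pvCounts done (cur ++ [e]) = pvCounts done cur := by
            simp [pvCounts, PySem.List.count, List.count_append, hSL]
          rw [h1]

theorem pv_foldl_max_zero_head (c : Int) (rest : List Int) (hc : 0 ≤ c) :
    List.foldl max 0 (c :: rest) = List.foldl max c rest := by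
  simp [List.foldl_cons, max_eq_right hc]

-- ===== VERDICT (by name: the statement is the Claim_ definition above) =====
theorem mls_py_spec : Claim_equal_mls_py := by
  intro exits _
  show mls_py exits = mls_py_alt exits
  have h := pv_invariant exits [] [] 0 0 (by simp [PySem.List.count]) (by simp [pvCounts, PySem.List.count])
  have hA : mls_py exits = (exits.foldl pvStepA (0, 0)).2 := rfl
  have hB : mls_py_alt exits =
      match pvCounts (exits.foldl pvStepB ([], [])).1 (exits.foldl pvStepB ([], [])).2 with
      | c :: rest => rest.foldl max c
      | [] => 0 := rfl
  rw [hA, hB, h]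
  cases hm : pvCounts (exits.foldl pvStepB ([], [])).1 (exits.foldl pvStepB ([], [])).2 with
  | nil => simp [pvCounts] at hm
  | cons c rest =>
    have hc : 0 ≤ c := by
      have hmem : c ∈ c :: rest := List.mem_cons_self
      rw [← hm] at hmem
      obtain ⟨s, _, hs⟩ := List.mem_map.mp hmem
      rw [← hs]; exact pv_count_nonneg s
    exact pv_foldl_max_zero_head c rest hc
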